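-- pv_equiv track=rewrite | github.com/DylanJWolf/drafter | drafter.py | get_round_and_pick
-- ===== SOURCE A (Python) =====
-- def get_round_and_pick(overall_pick):
--     round_starts = {
--         1: 1,
--         2: 33,
--         3: 65,
--         4: 103,
--         5: 139,
--         6: 177,
--         7: 217
--     }
--     round_ends = {
--         1: 32,
--         2: 64,
--         3: 102,
--         4: 138,
--         5: 176,
--         6: 216,
--         7: 257
--     }
--
--     for round_number in range(1, 8):
--         start = round_starts[round_number]
--         end = round_ends[round_number]
--         if start <= overall_pick <= end:
--             pick_in_round = overall_pick - start + 1
--             return f"round {round_number} pick {pick_in_round}"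
--
--     return "Pick number out of range"
-- ===== SOURCE B (Python) =====
-- def get_round_and_pick(overall_pick):
--     starts = [1, 33, 65, 103, 139, 177, 217, 258]  # round start picks, plus sentinel end
--     if overall_pick < 1 or overall_pick >= 258:
--         return "Pick number out of range"
--     # binary search for the greatest index lo with starts[lo] <= overall_pick
--     lo, hi = 0, 7
--     while hi - lo > 1:
--         mid = (lo + hi) // 2
--         if starts[mid] <= overall_pick:
--             lo = mid
--         else:
--             hi = mid
--     return f"round {lo + 1} pick {overall_pick - starts[lo] + 1}"
-- ===== Notes on version B (the rewrite author's own statement) =====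
-- stated objective: alternative
-- what changed: B replaces A's linear scan over seven precomputed start/end dict ranges with a binary search over a single cumulative-boundaries list, locating the round by bisection and computing the pick from its start entry.
import Mathlib
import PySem

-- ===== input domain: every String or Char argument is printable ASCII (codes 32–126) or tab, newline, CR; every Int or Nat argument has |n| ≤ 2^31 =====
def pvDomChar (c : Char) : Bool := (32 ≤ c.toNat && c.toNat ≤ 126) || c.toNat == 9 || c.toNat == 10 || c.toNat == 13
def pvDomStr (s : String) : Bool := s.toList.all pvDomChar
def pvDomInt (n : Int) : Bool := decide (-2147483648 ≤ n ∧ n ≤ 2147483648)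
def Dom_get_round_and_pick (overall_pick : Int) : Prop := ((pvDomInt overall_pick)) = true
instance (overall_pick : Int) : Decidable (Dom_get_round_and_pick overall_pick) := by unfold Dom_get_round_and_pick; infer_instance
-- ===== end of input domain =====

-- B finds the round by binary search over one cumulative-boundaries list instead of A's linear scan of start/end dict ranges; return values proved equal on all ints.
-- ===== PORT A =====
def pyRoundStarts : PySem.Dict Int Int :=
  PySem.Dict.ofList [(1, 1), (2, 33), (3, 65), (4, 103), (5, 139), (6, 177), (7, 217)]

def pyRoundEnds : PySem.Dict Int Int :=
  PySem.Dict.ofList [(1, 32), (2, 64), (3, 102), (4, 138), (5, 176), (6, 216), (7, 257)]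

-- the 'for round_number in range(1, 8)' loop with early return
def grpLoop (overall_pick : Int) : List Int → String
  | [] => "Pick number out of range"
  | r :: rest =>
    -- keys 1..7 are always present, so getD's default is never used (Python never raises here)
    let start := (pyRoundStarts.get? r).getD 0
    let stop := (pyRoundEnds.get? r).getD 0
    if start ≤ overall_pick ∧ overall_pick ≤ stop then
      "round " ++ PySem.Int.toStr r ++ " pick " ++ PySem.Int.toStr (overall_pick - start + 1)
    else grpLoop overall_pick rest

def get_round_and_pick (overall_pick : Int) : String :=
  grpLoop overall_pick (PySem.List.pyRange 1 8 1)

-- ===== PORT B =====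
-- the round start picks, plus sentinel end
def grpStarts : List Int := [1, 33, 65, 103, 139, 177, 217, 258]

-- the 'while hi - lo > 1' binary-search loop, with fuel bounding the iteration count
-- (8 > log2(range width), so the fuel is never exhausted); indices stay in range so pyGet?'s default is never used
def grpBisect (p : Int) : Nat → Int → Int → Int
  | 0, lo, _ => lo
  | fuel+1, lo, hi =>
    if hi - lo > 1 then
      let mid := PySem.Int.floordiv (lo + hi) 2
      if (PySem.List.pyGet? grpStarts mid).getD 0 ≤ p then grpBisect p fuel mid hi
      else grpBisect p fuel lo mid
    else lo

def get_round_and_pick_alt (overall_pick : Int) : String :=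
  if overall_pick < 1 ∨ overall_pick ≥ 258 then "Pick number out of range"
  else
    let lo := grpBisect overall_pick 8 0 7
    "round " ++ PySem.Int.toStr (lo + 1) ++ " pick " ++
      PySem.Int.toStr (overall_pick - (PySem.List.pyGet? grpStarts lo).getD 0 + 1)

-- ===== PRECONDITION & SPEC =====
def Spec_get_round_and_pick (overall_pick : Int) (out : String) : Prop := out = get_round_and_pick_alt overall_pick
instance (overall_pick : Int) (out : String) : Decidable (Spec_get_round_and_pick overall_pick out) := by unfold Spec_get_round_and_pick; infer_instance

-- ===== CLAIM =====
def Claim_equal_get_round_and_pick : Prop := ∀ (overall_pick : Int), Dom_get_round_and_pick overall_pick → Spec_get_round_and_pick overall_pick (get_round_and_pick overall_pick)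

-- ===== LEMMAS AND PROOFS =====

lemma bis1 (n : Int) (h1 : 1 ≤ n) (h2 : n ≤ 32) : grpBisect n 8 0 7 = 0 := by
  have t103 : ¬ (((103:Int)) ≤ n) := by omega
  have t33 : ¬ (((33:Int)) ≤ n) := by omega
  simp [grpBisect, t103, t33, PySem.Int.floordiv, PySem.List.pyGet?, grpStarts, PySem.List.pyIdx?]

lemma bis2 (n : Int) (h1 : 33 ≤ n) (h2 : n ≤ 64) : grpBisect n 8 0 7 = 1 := by
  have t103 : ¬ (((103:Int)) ≤ n) := by omega
  have t33 : (((33:Int)) ≤ n) := by omega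
  have t65 : ¬ (((65:Int)) ≤ n) := by omega
  simp [grpBisect, t103, t33, t65, PySem.Int.floordiv, PySem.List.pyGet?, grpStarts, PySem.List.pyIdx?]

lemma bis3 (n : Int) (h1 : 65 ≤ n) (h2 : n ≤ 102) : grpBisect n 8 0 7 = 2 := by
  have t103 : ¬ (((103:Int)) ≤ n) := by omega
  have t33 : (((33:Int)) ≤ n) := by omega
  have t65 : (((65:Int)) ≤ n) := by omega
  simp [grpBisect, t103, t33, t65, PySem.Int.floordiv, PySem.List.pyGet?, grpStarts, PySem.List.pyIdx?]

lemma bis4 (n : Int) (h1 : 103 ≤ n) (h2 : n ≤ 138) : grpBisect n 8 0 7 = 3 := by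
  have t103 : (((103:Int)) ≤ n) := by omega
  have t177 : ¬ (((177:Int)) ≤ n) := by omega
  have t139 : ¬ (((139:Int)) ≤ n) := by omega
  simp [grpBisect, t103, t177, t139, PySem.Int.floordiv, PySem.List.pyGet?, grpStarts, PySem.List.pyIdx?]

lemma bis5 (n : Int) (h1 : 139 ≤ n) (h2 : n ≤ 176) : grpBisect n 8 0 7 = 4 := by
  have t103 : (((103:Int)) ≤ n) := by omega
  have t177 : ¬ (((177:Int)) ≤ n) := by omega
  have t139 : (((139:Int)) ≤ n) := by omega
  simp [grpBisect, t103, t177, t139, PySem.Int.floordiv, PySem.List.pyGet?, grpStarts, PySem.List.pyIdx?]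

lemma bis6 (n : Int) (h1 : 177 ≤ n) (h2 : n ≤ 216) : grpBisect n 8 0 7 = 5 := by
  have t103 : (((103:Int)) ≤ n) := by omega
  have t177 : (((177:Int)) ≤ n) := by omega
  have t217 : ¬ (((217:Int)) ≤ n) := by omega
  simp [grpBisect, t103, t177, t217, PySem.Int.floordiv, PySem.List.pyGet?, grpStarts, PySem.List.pyIdx?]

lemma bis7 (n : Int) (h1 : 217 ≤ n) (h2 : n ≤ 257) : grpBisect n 8 0 7 = 6 := by
  have t103 : (((103:Int)) ≤ n) := by omega
  have t177 : (((177:Int)) ≤ n) := by omega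
  have t217 : (((217:Int)) ≤ n) := by omega
  simp [grpBisect, t103, t177, t217, PySem.Int.floordiv, PySem.List.pyGet?, grpStarts, PySem.List.pyIdx?]

-- ===== VERDICT =====
set_option maxHeartbeats 2000000 in
theorem get_round_and_pick_spec : Claim_equal_get_round_and_pick := by
  intro n _
  unfold Spec_get_round_and_pick get_round_and_pick get_round_and_pick_alt
  have hr : PySem.List.pyRange 1 8 1 = [1, 2, 3, 4, 5, 6, 7] := by decide
  rw [hr]
  have hs1 : (pyRoundStarts.get? 1).getD 0 = 1 := by decide
  have he1 : (pyRoundEnds.get? 1).getD 0 = 32 := by decide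
  have hs2 : (pyRoundStarts.get? 2).getD 0 = 33 := by decide
  have he2 : (pyRoundEnds.get? 2).getD 0 = 64 := by decide
  have hs3 : (pyRoundStarts.get? 3).getD 0 = 65 := by decide
  have he3 : (pyRoundEnds.get? 3).getD 0 = 102 := by decide
  have hs4 : (pyRoundStarts.get? 4).getD 0 = 103 := by decide
  have he4 : (pyRoundEnds.get? 4).getD 0 = 138 := by decide
  have hs5 : (pyRoundStarts.get? 5).getD 0 = 139 := by decide
  have he5 : (pyRoundEnds.get? 5).getD 0 = 176 := by decide
  have hs6 : (pyRoundStarts.get? 6).getD 0 = 177 := by decide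
  have he6 : (pyRoundEnds.get? 6).getD 0 = 216 := by decide
  have hs7 : (pyRoundStarts.get? 7).getD 0 = 217 := by decide
  have he7 : (pyRoundEnds.get? 7).getD 0 = 257 := by decide
  simp only [grpLoop, hs1, he1, hs2, he2, hs3, he3, hs4, he4, hs5, he5, hs6, he6, hs7, he7]
  by_cases hout : n < 1 ∨ n ≥ 258
  · rw [if_pos hout]
    split_ifs <;> first | rfl | omega
  · rw [if_neg hout]
    rw [not_or] at hout
    obtain ⟨h1, h2⟩ := hout
    have hg0 : (PySem.List.pyGet? grpStarts (0:Int)).getD 0 = 1 := by decide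
    have hg1 : (PySem.List.pyGet? grpStarts (1:Int)).getD 0 = 33 := by decide
    have hg2 : (PySem.List.pyGet? grpStarts (2:Int)).getD 0 = 65 := by decide
    have hg3 : (PySem.List.pyGet? grpStarts (3:Int)).getD 0 = 103 := by decide
    have hg4 : (PySem.List.pyGet? grpStarts (4:Int)).getD 0 = 139 := by decide
    have hg5 : (PySem.List.pyGet? grpStarts (5:Int)).getD 0 = 177 := by decide
    have hg6 : (PySem.List.pyGet? grpStarts (6:Int)).getD 0 = 217 := by decide
    by_cases c1 : n ≤ 32
    · rw [bis1 n (by omega) c1]; simp only [hg0]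
      split_ifs <;> first | omega | rfl
    · by_cases c2 : n ≤ 64
      · rw [bis2 n (by omega) c2]; simp only [hg1]
        split_ifs <;> first | omega | rfl
      · by_cases c3 : n ≤ 102
        · rw [bis3 n (by omega) c3]; simp only [hg2]
          split_ifs <;> first | omega | rfl
        · by_cases c4 : n ≤ 138
          · rw [bis4 n (by omega) c4]; simp only [hg3]
            split_ifs <;> first | omega | rfl
          · by_cases c5 : n ≤ 176
            · rw [bis5 n (by omega) c5]; simp only [hg4]
              split_ifs <;> first | omega | rfl
            · by_cases c6 : n ≤ 216
              · rw [bis6 n (by omega) c6]; simp only [hg5]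
                split_ifs <;> first | omega | rfl
              · rw [bis7 n (by omega) (by omega)]; simp only [hg6]
                split_ifs <;> first | omega | rfl
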